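-- pv_equiv track=rewrite | github.com/0xnedarjercon/walletProtector | getBalances.py | getEventHistory
-- ===== SOURCE A (Python) =====
-- def getEventHistory(events, minBlock, maxBlock):
--     history = []
--     rcvHistory = []
--
--     hasAddress = False
--     elapsedTimes = []
--     if len(events) == 0:
--         return [], [], []
--     i = 1
--     currentBlock = events[-1][0]
--     if len(events)>0:
--         while currentBlock >= minBlock:
--             if currentBlock <= maxBlock:
--                 history.insert(0,events[-i][1])
--                 if events[-i][1] == 'tr_rcv':
--                     largestSender = max(events[-i][2], key=events[-i][2].get)
--                     rcvHistory.insert(0,events[-i][1]+largestSender)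
--                     hasAddress = True
--                 else:
--                     rcvHistory.insert(0,events[-i][1])
--
--                 elapsedTimes.insert(0,maxBlock - events[-i][0])
--             i+=1
--             if i > len(events):
--                 break
--             currentBlock = (events[-i][0])
--     if not hasAddress:
--         rcvHistory = []
--
--
--     return history, elapsedTimes, rcvHistory
-- ===== SOURCE B (Python) =====
-- def getEventHistory(events, minBlock, maxBlock):
--     # phase 1: find start of the maximal suffix whose blocks are all >= minBlock
--     start = len(events)
--     while start > 0 and events[start - 1][0] >= minBlock:
--         start -= 1
--     # phase 2: build the three lists forward over that suffix
--     history = []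
--     elapsedTimes = []
--     rcvHistory = []
--     hasAddress = False
--     for block, label, senders in events[start:]:
--         if block <= maxBlock:
--             history.append(label)
--             elapsedTimes.append(maxBlock - block)
--             if label == 'tr_rcv':
--                 largestSender = max(senders, key=senders.get)
--                 rcvHistory.append(label + largestSender)
--                 hasAddress = True
--             else:
--                 rcvHistory.append(label)
--     if not hasAddress:
--         rcvHistory = []
--     return history, elapsedTimes, rcvHistory
-- ===== Notes on version B (the rewrite author's own statement) =====
-- stated objective: alternative
-- what changed: A's single backward while-loop with negative indexing and insert(0,...) prepends is replaced by two phases: a backward scan that only finds the start index of the maximal suffix with blocks >= minBlock, then a forward for-loop over events[start:] building the three lists by append.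
import Mathlib
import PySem

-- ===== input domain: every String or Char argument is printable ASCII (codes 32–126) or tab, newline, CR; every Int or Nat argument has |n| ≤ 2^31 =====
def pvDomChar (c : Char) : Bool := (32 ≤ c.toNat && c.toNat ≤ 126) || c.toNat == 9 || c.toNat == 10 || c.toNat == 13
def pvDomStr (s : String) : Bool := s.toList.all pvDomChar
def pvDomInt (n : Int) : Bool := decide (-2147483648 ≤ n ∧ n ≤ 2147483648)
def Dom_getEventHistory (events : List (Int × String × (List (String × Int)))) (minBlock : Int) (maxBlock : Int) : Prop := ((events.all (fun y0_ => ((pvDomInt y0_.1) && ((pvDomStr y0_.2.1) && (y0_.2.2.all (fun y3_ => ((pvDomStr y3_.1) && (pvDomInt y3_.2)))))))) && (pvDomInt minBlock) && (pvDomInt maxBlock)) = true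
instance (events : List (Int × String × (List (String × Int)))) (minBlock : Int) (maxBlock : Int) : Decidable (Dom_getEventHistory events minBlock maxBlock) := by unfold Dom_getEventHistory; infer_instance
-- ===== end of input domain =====

-- B replaces A's single backward insert(0,..)-prepending while-loop by a boundary-finding backward
-- scan plus a forward appending pass over events[start:] (objective: alternative decomposition).
-- Equivalence is about the RETURN value; neither version mutates its arguments.

-- ===== PORT A =====

-- total form of Python's max(d, key=d.get) on the dict built from `pairs`;
-- "" only where Python raises ValueError (empty dict), which Pre_ excludes
def pvSenderA (pairs : List (String × Int)) : String :=
  let d := PySem.Dict.ofList pairs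
  (PySem.List.max? (PySem.Dict.keys d) (fun k => PySem.Dict.getD d k 0)).getD ""

def pvDefEv : Int × String × (List (String × Int)) := (0, "", [])

-- body of A's `if currentBlock <= maxBlock:` block; `ev` is events[-i] (so ev.1 = currentBlock)
def pvStepA (maxBlock : Int) (currentBlock : Int) (ev : Int × String × (List (String × Int)))
    (st : List String × List Int × List String × Bool) :
    List String × List Int × List String × Bool :=
  if currentBlock ≤ maxBlock then
    let history := ev.2.1 :: st.1
    let (rcvHistory, hasAddress) :=
      if ev.2.1 = "tr_rcv" then ((ev.2.1 ++ pvSenderA ev.2.2) :: st.2.2.1, true)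
      else (ev.2.1 :: st.2.2.1, st.2.2.2)
    (history, (maxBlock - ev.1) :: st.2.1, rcvHistory, hasAddress)
  else st

-- A's while-loop: fuel = number of `i += 1` steps still allowed before `i > len(events)` breaks
def pvLoopA (events : List (Int × String × (List (String × Int)))) (minBlock maxBlock : Int) :
    Nat → Nat → Int → (List String × List Int × List String × Bool) →
    List String × List Int × List String × Bool
  | 0, i, currentBlock, st =>
    if minBlock ≤ currentBlock then
      pvStepA maxBlock currentBlock (PySem.List.pyGetD events (-(i : Int)) pvDefEv) st
    else st
  | fuel + 1, i, currentBlock, st =>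
    if minBlock ≤ currentBlock then
      pvLoopA events minBlock maxBlock fuel (i + 1)
        (PySem.List.pyGetD events (-((i + 1 : Nat) : Int)) pvDefEv).1
        (pvStepA maxBlock currentBlock (PySem.List.pyGetD events (-(i : Int)) pvDefEv) st)
    else st

def getEventHistory (events : List (Int × String × (List (String × Int)))) (minBlock : Int) (maxBlock : Int) : List String × List Int × List String :=
  if events.length = 0 then ([], [], [])
  else
    let currentBlock := (PySem.List.pyGetD events (-1) pvDefEv).1
    let st := pvLoopA events minBlock maxBlock (events.length - 1) 1 currentBlock ([], [], [], false)
    (st.1, st.2.1, if st.2.2.2 then st.2.2.1 else [])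

-- ===== PORT B =====

-- same expression as in Source B: max(senders, key=senders.get); "" only where Python raises (excluded by Pre_)
def pvSenderB (pairs : List (String × Int)) : String :=
  let d := PySem.Dict.ofList pairs
  (PySem.List.max? (PySem.Dict.keys d) (fun k => PySem.Dict.getD d k 0)).getD ""

-- phase 1 of Source B: `start = len(events); while start > 0 and events[start-1][0] >= minBlock: start -= 1`
def pvFindStart (events : List (Int × String × (List (String × Int)))) (minBlock : Int) : Nat → Nat
  | 0 => 0
  | n + 1 => if minBlock ≤ (events.getD n pvDefEv).1 then pvFindStart events minBlock n else n + 1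

def getEventHistory_alt (events : List (Int × String × (List (String × Int)))) (minBlock : Int) (maxBlock : Int) : List String × List Int × List String :=
  let start := pvFindStart events minBlock events.length
  -- events[start:] with 0 ≤ start ≤ len(events) is exactly List.drop start
  let st := (events.drop start).foldl
    (fun (st : List String × List Int × List String × Bool) e =>
      if e.1 ≤ maxBlock then
        let history := st.1 ++ [e.2.1]
        let elapsedTimes := st.2.1 ++ [maxBlock - e.1]
        let (rcvHistory, hasAddress) :=
          if e.2.1 = "tr_rcv" then (st.2.2.1 ++ [e.2.1 ++ pvSenderB e.2.2], true)
          else (st.2.2.1 ++ [e.2.1], st.2.2.2)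
        (history, elapsedTimes, rcvHistory, hasAddress)
      else st)
    ([], [], [], false)
  (st.1, st.2.1, if st.2.2.2 then st.2.2.1 else [])

-- ===== PRECONDITION & SPEC =====
-- Pre_ excludes exactly the inputs where Python A raises ValueError: a 'tr_rcv' event with an EMPTY
-- sender dict that lies in the scanned suffix (all blocks from it to the end ≥ minBlock) and has
-- block ≤ maxBlock; B raises the same ValueError there.
def Pre_getEventHistory (events : List (Int × String × (List (String × Int)))) (minBlock : Int) (maxBlock : Int) : Prop :=
  ∀ e ∈ events.reverse.takeWhile (fun e => decide (minBlock ≤ e.1)),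
    e.1 ≤ maxBlock → e.2.1 = "tr_rcv" → e.2.2 ≠ []
instance (events : List (Int × String × (List (String × Int)))) (minBlock : Int) (maxBlock : Int) : Decidable (Pre_getEventHistory events minBlock maxBlock) := by unfold Pre_getEventHistory; infer_instance

def pvWitness_getEventHistory : (List (Int × String × (List (String × Int)))) × Int × Int :=
  ([(5, "tr_rcv", [("a", 1)]), (2, "send", [])], 0, 10)

def Spec_getEventHistory (events : List (Int × String × (List (String × Int)))) (minBlock : Int) (maxBlock : Int) (out : List String × List Int × List String) : Prop := out = getEventHistory_alt events minBlock maxBlock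
instance (events : List (Int × String × (List (String × Int)))) (minBlock : Int) (maxBlock : Int) (out : List String × List Int × List String) : Decidable (Spec_getEventHistory events minBlock maxBlock out) := by unfold Spec_getEventHistory; infer_instance

-- ===== CLAIM (what is proved, stated in full; the proofs are below) =====
def Claim_equal_getEventHistory : Prop := ∀ (events : List (Int × String × (List (String × Int)))) (minBlock : Int) (maxBlock : Int), Dom_getEventHistory events minBlock maxBlock → Pre_getEventHistory events minBlock maxBlock → Spec_getEventHistory events minBlock maxBlock (getEventHistory events minBlock maxBlock)

-- ===== LEMMAS AND PROOFS =====

-- proof-side reshaping of A's loop: consume the reversed list from the front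
def pvProcRev (minBlock maxBlock : Int) :
    List (Int × String × (List (String × Int))) →
    (List String × List Int × List String × Bool) →
    List String × List Int × List String × Bool
  | [], st => st
  | e :: rest, st =>
    if minBlock ≤ e.1 then pvProcRev minBlock maxBlock rest (pvStepA maxBlock e.1 e st) else st

theorem pvSenderB_eq : pvSenderB = pvSenderA := rfl

-- per-element pieces of the processed state (proof-side only)
def pvLab (e : Int × String × (List (String × Int))) : String := e.2.1
def pvEls (maxBlock : Int) (e : Int × String × (List (String × Int))) : Int := maxBlock - e.1
def pvEnt (e : Int × String × (List (String × Int))) : String :=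
  if e.2.1 = "tr_rcv" then e.2.1 ++ pvSenderA e.2.2 else e.2.1
def pvQ (maxBlock : Int) (e : Int × String × (List (String × Int))) : Bool := decide (e.1 ≤ maxBlock)
def pvHas (e : Int × String × (List (String × Int))) : Bool := e.2.1 == "tr_rcv"

theorem pvPyGetD_neg (events : List (Int × String × (List (String × Int)))) (i : Nat)
    (h1 : 1 ≤ i) (h2 : i ≤ events.length) :
    PySem.List.pyGetD events (-(i : Int)) pvDefEv = events.reverse.getD (i - 1) pvDefEv := by
  rw [PySem.List.pyGetD_neg_natCast events i pvDefEv h1 h2]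
  rw [List.getD_eq_getElem _ _ (by simp; omega), List.getElem_reverse]
  congr 1
  omega

theorem pvLoopA_eq_procRev (events : List (Int × String × (List (String × Int)))) (minBlock maxBlock : Int) :
    ∀ (fuel i : Nat) (st : List String × List Int × List String × Bool),
      1 ≤ i → i + fuel = events.length →
      pvLoopA events minBlock maxBlock fuel i (events.reverse.getD (i - 1) pvDefEv).1 st
        = pvProcRev minBlock maxBlock (events.reverse.drop (i - 1)) st := by
  intro fuel
  induction fuel with
  | zero =>
      intro i st h1 h2
      have hi : i = events.length := by omega
      have hlt : i - 1 < events.reverse.length := by simp; omega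
      have hdrop : events.reverse.drop (i - 1) = [events.reverse[i - 1]] := by
        rw [List.drop_eq_getElem_cons hlt]
        have : events.reverse.drop (i - 1 + 1) = [] := by
          apply List.drop_eq_nil_of_le; simp; omega
        rw [this]
      have hget : events.reverse.getD (i - 1) pvDefEv = events.reverse[i - 1] :=
        List.getD_eq_getElem _ _ hlt
      rw [hdrop]
      simp only [pvLoopA, pvProcRev, hget, pvPyGetD_neg events i h1 (by omega)]
  | succ fuel ih =>
      intro i st h1 h2
      have hlt : i - 1 < events.reverse.length := by simp; omega
      have hget : events.reverse.getD (i - 1) pvDefEv = events.reverse[i - 1] :=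
        List.getD_eq_getElem _ _ hlt
      rw [List.drop_eq_getElem_cons hlt]
      simp only [pvLoopA, pvProcRev, hget, pvPyGetD_neg events i h1 (by omega)]
      by_cases hp : minBlock ≤ events.reverse[i - 1].1
      · rw [if_pos hp, if_pos hp]
        have hrec := ih (i + 1) (pvStepA maxBlock events.reverse[i - 1].1 events.reverse[i - 1] st)
          (by omega) (by omega)
        have e1 : i + 1 - 1 = i - 1 + 1 := by omega
        rw [e1] at hrec
        rw [pvPyGetD_neg events (i + 1) (by omega) (by omega)]
        rw [e1]
        exact hrec
      · rw [if_neg hp, if_neg hp]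

theorem pvProcRev_eq_foldl (minBlock maxBlock : Int)
    (l : List (Int × String × (List (String × Int)))) (st : List String × List Int × List String × Bool) :
    pvProcRev minBlock maxBlock l st
      = (l.takeWhile (fun e => decide (minBlock ≤ e.1))).foldl
          (fun st e => pvStepA maxBlock e.1 e st) st := by
  induction l generalizing st with
  | nil => simp [pvProcRev]
  | cons e rest ih =>
      by_cases hp : minBlock ≤ e.1
      · simp [pvProcRev, hp, ih]
      · simp [pvProcRev, hp]

theorem pvFindStart_eq (events : List (Int × String × (List (String × Int)))) (minBlock : Int) :
    ∀ n, n ≤ events.length →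
      pvFindStart events minBlock n
        = n - (((events.take n).reverse).takeWhile (fun e => decide (minBlock ≤ e.1))).length := by
  intro n
  induction n with
  | zero => intro _; simp [pvFindStart]
  | succ n ih =>
      intro hn
      have hlt : n < events.length := by omega
      have htake : events.take (n + 1) = events.take n ++ [events[n]] := by
        rw [List.take_add_one, List.getElem?_eq_getElem hlt]; rfl
      have hgetD : events.getD n pvDefEv = events[n] := List.getD_eq_getElem _ _ hlt
      have hlen : ((events.take n).reverse.takeWhile
          (fun e => decide (minBlock ≤ e.1))).length ≤ n := by
        calc _ ≤ (events.take n).reverse.length := (List.takeWhile_sublist _).length_le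
        _ ≤ n := by simp
      rw [pvFindStart, hgetD, htake]
      by_cases hp : minBlock ≤ events[n].1
      · rw [if_pos hp, ih (by omega)]
        rw [List.reverse_append, List.reverse_singleton, List.singleton_append,
          List.takeWhile_cons_of_pos (by simpa using hp), List.length_cons]
        omega
      · rw [if_neg hp]
        rw [List.reverse_append, List.reverse_singleton, List.singleton_append,
          List.takeWhile_cons_of_neg (by simpa using hp), List.length_nil]
        omega

-- closed form of A's prepend loop over any list
theorem pvFoldl_prep (maxBlock : Int)
    (l : List (Int × String × (List (String × Int)))) :
    ∀ st : List String × List Int × List String × Bool,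
    l.foldl (fun st e => pvStepA maxBlock e.1 e st) st
      = ((((l.filter (pvQ maxBlock)).map pvLab).reverse ++ st.1,
          (((l.filter (pvQ maxBlock)).map (pvEls maxBlock)).reverse ++ st.2.1),
          (((l.filter (pvQ maxBlock)).map pvEnt).reverse ++ st.2.2.1),
          (st.2.2.2 || (l.filter (pvQ maxBlock)).any pvHas))) := by
  induction l with
  | nil => intro st; simp
  | cons e rest ih =>
      intro st
      rw [List.foldl_cons, ih]
      by_cases hq : e.1 ≤ maxBlock
      · by_cases hr : e.2.1 = "tr_rcv"
        · simp [pvStepA, pvQ, pvLab, pvEls, pvEnt, pvHas, hq, hr]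
        · have hfalse : (e.2.1 == "tr_rcv") = false := by simp [hr]
          simp [pvStepA, pvQ, pvLab, pvEls, pvEnt, pvHas, hq, hr, hfalse]
      · simp [pvStepA, pvQ, hq]

-- closed form of B's append loop over any list
theorem pvFoldl_app (maxBlock : Int)
    (m : List (Int × String × (List (String × Int)))) :
    ∀ st : List String × List Int × List String × Bool,
    m.foldl (fun (st : List String × List Int × List String × Bool) e =>
      if e.1 ≤ maxBlock then
        let history := st.1 ++ [e.2.1]
        let elapsedTimes := st.2.1 ++ [maxBlock - e.1]
        let (rcvHistory, hasAddress) :=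
          if e.2.1 = "tr_rcv" then (st.2.2.1 ++ [e.2.1 ++ pvSenderB e.2.2], true)
          else (st.2.2.1 ++ [e.2.1], st.2.2.2)
        (history, elapsedTimes, rcvHistory, hasAddress)
      else st) st
      = ((st.1 ++ (m.filter (pvQ maxBlock)).map pvLab,
          st.2.1 ++ (m.filter (pvQ maxBlock)).map (pvEls maxBlock),
          st.2.2.1 ++ (m.filter (pvQ maxBlock)).map pvEnt,
          (st.2.2.2 || (m.filter (pvQ maxBlock)).any pvHas))) := by
  induction m with
  | nil => intro st; simp
  | cons e rest ih =>
      intro st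
      rw [List.foldl_cons, ih]
      by_cases hq : e.1 ≤ maxBlock
      · by_cases hr : e.2.1 = "tr_rcv"
        · simp [pvQ, pvLab, pvEls, pvEnt, pvHas, pvSenderB_eq, hq, hr]
        · have hfalse : (e.2.1 == "tr_rcv") = false := by simp [hr]
          simp [pvQ, pvLab, pvEls, pvEnt, pvHas, hq, hr, hfalse]
      · simp [pvQ, hq]

-- events with the suffix boundary removed is the reversed takeWhile of the reverse
theorem pvDrop_start (events : List (Int × String × (List (String × Int)))) (minBlock : Int) :
    events.drop (events.length -
        (events.reverse.takeWhile (fun e => decide (minBlock ≤ e.1))).length)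
      = (events.reverse.takeWhile (fun e => decide (minBlock ≤ e.1))).reverse := by
  have hsplit := List.takeWhile_append_dropWhile
    (p := fun e : Int × String × (List (String × Int)) => decide (minBlock ≤ e.1))
    (l := events.reverse)
  set t := events.reverse.takeWhile (fun e => decide (minBlock ≤ e.1)) with ht
  set d := events.reverse.dropWhile (fun e => decide (minBlock ≤ e.1)) with hd
  have hev : events = d.reverse ++ t.reverse := by
    have : events.reverse = t ++ d := hsplit.symm
    calc events = events.reverse.reverse := by simp
    _ = (t ++ d).reverse := by rw [← this]
    _ = d.reverse ++ t.reverse := by simp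
  have hlenev : events.length = t.length + d.length := by
    conv_lhs => rw [hev]
    simp [Nat.add_comm]
  have hlen : events.length - t.length = d.reverse.length := by simp; omega
  rw [hlen]
  conv_lhs => rw [hev]
  exact List.drop_left

theorem getEventHistory_spec : Claim_equal_getEventHistory := by
  intro events minBlock maxBlock _ _
  show getEventHistory events minBlock maxBlock = getEventHistory_alt events minBlock maxBlock
  by_cases hne : events = []
  · subst hne; rfl
  have hlen : 0 < events.length := List.length_pos_iff.mpr hne
  -- A's side: the backward while-loop is pvProcRev over the reversed list
  have hpg : PySem.List.pyGetD events (-1 : Int) pvDefEv = events.reverse.getD 0 pvDefEv := by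
    have h := pvPyGetD_neg events 1 (by omega) (by omega)
    simp only [Nat.cast_one] at h
    exact h
  have h2 := pvLoopA_eq_procRev events minBlock maxBlock (events.length - 1) 1
    ([], [], [], false) (by omega) (by omega)
  simp only [Nat.sub_self, List.drop_zero] at h2
  have hA : getEventHistory events minBlock maxBlock
      = ((pvProcRev minBlock maxBlock events.reverse ([], [], [], false)).1,
         (pvProcRev minBlock maxBlock events.reverse ([], [], [], false)).2.1,
         if (pvProcRev minBlock maxBlock events.reverse ([], [], [], false)).2.2.2
         then (pvProcRev minBlock maxBlock events.reverse ([], [], [], false)).2.2.1 else []) := by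
    unfold getEventHistory
    rw [if_neg (show ¬events.length = 0 by omega)]
    show (let st := pvLoopA events minBlock maxBlock (events.length - 1) 1
            ((PySem.List.pyGetD events (-1) pvDefEv).1) ([], [], [], false)
          (st.1, st.2.1, if st.2.2.2 then st.2.2.1 else [])) = _
    rw [hpg, h2]
  rw [hA]
  -- B's side
  have hstart : pvFindStart events minBlock events.length
      = events.length - (events.reverse.takeWhile (fun e => decide (minBlock ≤ e.1))).length := by
    rw [pvFindStart_eq events minBlock events.length (le_refl _)]
    simp
  simp only [getEventHistory_alt, hstart, pvDrop_start]
  rw [pvProcRev_eq_foldl]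
  set t := events.reverse.takeWhile (fun e => decide (minBlock ≤ e.1)) with ht
  rw [pvFoldl_prep maxBlock t, pvFoldl_app maxBlock t.reverse]
  have hcond : ((List.filter (pvQ maxBlock) t.reverse).any pvHas)
      = ((List.filter (pvQ maxBlock) t).any pvHas) := by
    rw [List.filter_reverse, List.any_reverse]
  rw [hcond]
  simp [List.filter_reverse, List.map_reverse]
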